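-- pv_equiv track=rewrite | github.com/leolech14/standard-model-of-code | standard-model-of-code/src/core/edge_extractor.py | get_edge_resolution_summary
-- ===== SOURCE A (Python) =====
-- from typing import Dict, List, Optional, Set, Tuple, Any
--
-- def get_edge_resolution_summary(edges: List[Dict]) -> Dict[str, Dict[str, int]]:
--     """
--     Summarize edge resolution status by edge type.
--
--     Returns:
--         Dict mapping edge_type -> {resolution -> count}
--     """
--     summary: Dict[str, Dict[str, int]] = {}
--
--     for edge in edges:
--         edge_type = edge.get('edge_type', 'unknown')
--         resolution = edge.get('resolution', 'missing')
--
--         if edge_type not in summary: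
--             summary[edge_type] = {}
--
--         summary[edge_type][resolution] = summary[edge_type].get(resolution, 0) + 1
--
--     return summary
-- ===== SOURCE B (Python) =====
-- def get_edge_resolution_summary(edges):
--     """Declarative regrouping: flat key list, then nested dict comprehensions over
--     first-occurrence-ordered distinct types/resolutions, counting with list.count."""
--     keys = [(e.get('edge_type', 'unknown'), e.get('resolution', 'missing')) for e in edges]
--     return {
--         t: {r: keys.count((t, r))
--             for r in dict.fromkeys(r2 for t2, r2 in keys if t2 == t)}
--         for t in dict.fromkeys(t for t, _ in keys)
--     }
-- ===== Notes on version B (the rewrite author's own statement) =====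
-- stated objective: alternative
-- what changed: Replaces A's single-pass incremental nested-dict counting with a declarative construction: a flat key list, then nested dict comprehensions over the first-occurrence-ordered distinct edge types and (per type) resolutions, each count obtained by list.count over the key list instead of any running counter.
import Mathlib
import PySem

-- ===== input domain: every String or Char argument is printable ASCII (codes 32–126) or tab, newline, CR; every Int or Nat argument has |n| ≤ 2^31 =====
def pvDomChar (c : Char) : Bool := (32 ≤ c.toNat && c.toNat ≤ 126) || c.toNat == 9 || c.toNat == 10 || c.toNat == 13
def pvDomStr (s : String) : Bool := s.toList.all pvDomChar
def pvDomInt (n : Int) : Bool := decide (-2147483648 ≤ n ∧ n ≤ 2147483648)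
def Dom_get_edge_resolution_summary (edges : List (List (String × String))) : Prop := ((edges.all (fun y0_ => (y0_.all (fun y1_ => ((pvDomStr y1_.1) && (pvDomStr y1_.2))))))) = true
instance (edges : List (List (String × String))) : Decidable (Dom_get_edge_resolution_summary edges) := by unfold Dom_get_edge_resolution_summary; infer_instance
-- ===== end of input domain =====

-- B replaces A's single-pass incremental nested-dict counting with a declarative construction
-- (flat key list, dedup-ordered comprehensions, counts via list.count); alternative structure, same return value (proved).


-- ===== PORT A =====
def get_edge_resolution_summary (edges : List (List (String × String))) : List (String × List (String × Int)) :=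
  let summary : PySem.Dict String (PySem.Dict String Int) :=
    edges.foldl (fun summary edge =>
      let edge_type := (PySem.Dict.mk edge).getD "edge_type" "unknown"
      let resolution := (PySem.Dict.mk edge).getD "resolution" "missing"
      let summary := if summary.contains edge_type then summary else summary.insert edge_type PySem.Dict.empty
      summary.insert edge_type
        ((summary.getD edge_type PySem.Dict.empty).insert resolution
          ((summary.getD edge_type PySem.Dict.empty).getD resolution 0 + 1))) PySem.Dict.empty
  summary.items.map (fun p => (p.1, p.2.items))

-- ===== PORT B =====
def get_edge_resolution_summary_alt (edges : List (List (String × String))) : List (String × List (String × Int)) :=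
  let keys : List (String × String) :=
    edges.map (fun e => ((PySem.Dict.mk e).getD "edge_type" "unknown", (PySem.Dict.mk e).getD "resolution" "missing"))
  (PySem.List.dedup (keys.map (·.1))).map (fun t =>
    (t, (PySem.List.dedup ((keys.filter (fun k => k.1 == t)).map (·.2))).map
          (fun r => (r, (keys.count (t, r) : Int)))))

-- ===== PRECONDITION & SPEC =====
def Spec_get_edge_resolution_summary (edges : List (List (String × String))) (out : List (String × List (String × Int))) : Prop := out = get_edge_resolution_summary_alt edges
instance (edges : List (List (String × String))) (out : List (String × List (String × Int))) : Decidable (Spec_get_edge_resolution_summary edges out) := by unfold Spec_get_edge_resolution_summary; infer_instance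

-- ===== CLAIM (what is proved, stated in full; the proofs are below) =====
def Claim_equal_get_edge_resolution_summary : Prop := ∀ (edges : List (List (String × String))), Dom_get_edge_resolution_summary edges → Spec_get_edge_resolution_summary edges (get_edge_resolution_summary edges)

-- ===== LEMMAS AND PROOFS =====

-- the (edge_type, resolution) key both programs extract from an edge
def pvKey (edge : List (String × String)) : String × String :=
  ((PySem.Dict.mk edge).getD "edge_type" "unknown", (PySem.Dict.mk edge).getD "resolution" "missing")

-- 'if edge_type not in summary: summary[edge_type] = {}'
def pvEns (s : PySem.Dict String (PySem.Dict String Int)) (e : String) : PySem.Dict String (PySem.Dict String Int) :=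
  if s.contains e then s else s.insert e PySem.Dict.empty

-- loop body of A
def pvStepA (s : PySem.Dict String (PySem.Dict String Int)) (k : String × String) : PySem.Dict String (PySem.Dict String Int) :=
  (pvEns s k.1).insert k.1
    (((pvEns s k.1).getD k.1 PySem.Dict.empty).insert k.2
      (((pvEns s k.1).getD k.1 PySem.Dict.empty).getD k.2 0 + 1))

theorem pvGetD_ens_of_ne (s : PySem.Dict String (PySem.Dict String Int)) {e x : String} (h : x ≠ e) (d : PySem.Dict String Int) :
    (pvEns s e).getD x d = s.getD x d := by
  unfold pvEns
  split_ifs with h₀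
  · rfl
  · exact PySem.Dict.getD_insert_of_ne _ _ _ h

theorem pvGetD_ens_self (s : PySem.Dict String (PySem.Dict String Int)) (e : String) :
    (pvEns s e).getD e PySem.Dict.empty = s.getD e PySem.Dict.empty := by
  unfold pvEns
  split_ifs with h
  · rfl
  · rw [PySem.Dict.getD_insert_self, PySem.Dict.getD_of_not_contains _ _ (by simpa using h)]

theorem pvContains_ens_self (s : PySem.Dict String (PySem.Dict String Int)) (e : String) :
    (pvEns s e).contains e = true := by
  unfold pvEns
  split_ifs with h
  · exact h
  · exact PySem.Dict.contains_insert_self _ _ _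

theorem pvKeys_ens (s : PySem.Dict String (PySem.Dict String Int)) (e : String) :
    (pvEns s e).keys = PySem.Set.add s.keys e := by
  unfold pvEns PySem.Set.add
  by_cases h : s.contains e = true
  · rw [if_pos h,
        if_pos ((PySem.Set.contains_iff _ _).mpr ((PySem.Dict.contains_iff_mem_keys s e).mp h))]
  · have h' : s.contains e = false := by simpa using h
    rw [if_neg (by simp [h']),
        if_neg (fun hm => by
          have := (PySem.Dict.contains_iff_mem_keys s e).mpr ((PySem.Set.contains_iff _ _).mp hm)
          simp [this] at h'),
        PySem.Dict.keys_insert_of_not_contains _ _ h']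

-- the outer keys collected by A's loop, in first-occurrence order
theorem pvKeysA (ps : List (String × String)) (s : PySem.Dict String (PySem.Dict String Int)) :
    (ps.foldl pvStepA s).keys = PySem.Set.update s.keys (ps.map Prod.fst) := by
  induction ps generalizing s with
  | nil => rw [List.map_nil, PySem.Set.update_nil, List.foldl_nil]
  | cons p ps ih =>
    rw [List.foldl_cons, List.map_cons, PySem.Set.update_cons, ih]
    congr 1
    rw [pvStepA, PySem.Dict.keys_insert_of_contains _ _ (pvContains_ens_self s p.1), pvKeys_ens]

-- A's inner dict at t is the counting fold of the resolutions filed under t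
theorem pvInnerA (ps : List (String × String)) (s : PySem.Dict String (PySem.Dict String Int)) (t : String) :
    (ps.foldl pvStepA s).getD t PySem.Dict.empty
      = ((ps.filter (fun p => p.1 == t)).map Prod.snd).foldl
          (fun d r => d.insert r (d.getD r 0 + 1)) (s.getD t PySem.Dict.empty) := by
  induction ps generalizing s with
  | nil => rfl
  | cons p ps ih =>
    rw [List.foldl_cons, ih, List.filter_cons]
    by_cases h : p.1 = t
    · rw [if_pos (by simp [h]), List.map_cons, List.foldl_cons]
      congr 1
      rw [pvStepA, ← h, PySem.Dict.getD_insert_self, pvGetD_ens_self]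
    · rw [if_neg (by simp [h])]
      congr 1
      rw [pvStepA, PySem.Dict.getD_insert_of_ne _ _ _ (fun hc => h hc.symm),
          pvGetD_ens_of_ne _ (fun hc => h hc.symm)]

-- counting r among the resolutions filed under t = counting the pair (t, r)
theorem pvCountFilter (l : List (String × String)) (t r : String) :
    ((l.filter (fun p => p.1 == t)).map Prod.snd).count r = l.count (t, r) := by
  induction l with
  | nil => rfl
  | cons p l ih =>
    rw [List.filter_cons, List.count_cons]
    by_cases h1 : p.1 = t
    · rw [if_pos (by simp [h1]), List.map_cons, List.count_cons, ih]
      congr 1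
      obtain ⟨p1, p2⟩ := p
      simp_all [Prod.ext_iff]
    · rw [if_neg (by simp [h1]), ih]
      have : ¬ p = (t, r) := fun hc => h1 (by rw [hc])
      simp [this]

theorem pvA_eq (edges : List (List (String × String))) :
    get_edge_resolution_summary edges
      = ((edges.map pvKey).foldl pvStepA PySem.Dict.empty).items.map (fun p => (p.1, p.2.items)) := by
  rw [List.foldl_map]; rfl

-- ===== VERDICT (by name: the statement is the Claim_ definition above) =====
theorem get_edge_resolution_summary_spec : Claim_equal_get_edge_resolution_summary := by
  intro edges _
  show get_edge_resolution_summary edges = get_edge_resolution_summary_alt edges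
  rw [pvA_eq, get_edge_resolution_summary_alt]
  set ks := edges.map pvKey with hks
  have hkeysmap : edges.map (fun e => ((PySem.Dict.mk e).getD "edge_type" "unknown", (PySem.Dict.mk e).getD "resolution" "missing")) = ks := rfl
  set s := ks.foldl pvStepA PySem.Dict.empty with hs
  have hkeys : s.keys = PySem.Set.ofList (ks.map Prod.fst) := by
    rw [hs, pvKeysA, PySem.Dict.keys_empty, PySem.Set.update_nil_left]
  have hnd : s.keys.Nodup := hkeys ▸ PySem.Set.nodup_ofList _
  rw [PySem.Dict.items_eq_map_keys s hnd PySem.Dict.empty, List.map_map, hkeysmap, hkeys,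
      PySem.List.dedup_eq_ofList]
  apply List.map_congr_left
  intro t _
  simp only [Function.comp]
  congr 1
  rw [hs, pvInnerA, PySem.Dict.getD_empty, PySem.Dict.foldl_insert_getD_add_one_eq_counter,
      PySem.Dict.items_counter, PySem.List.dedup_eq_ofList]
  apply List.map_congr_left
  intro r _
  rw [pvCountFilter]
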